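-- pv_equiv track=rewrite | github.com/wzxie/Genome-Repair-Tools | scripts/gap_complete_controller_module_enhanced.py | _find_gap_regions
-- ===== SOURCE A (Python) =====
-- from typing import Dict, List, Tuple, Optional, Any, Set
--
-- def _find_gap_regions(sequence: str, min_gap_size: int = 50) -> List[Dict]:
--     gaps = []
--
--     i = 0
--     while i < len(sequence):
--         if sequence[i].upper() == 'N':
--             start = i
--             while i < len(sequence) and sequence[i].upper() == 'N':
--                 i += 1
--             end = i
--             gap_length = end - start
--
--             if gap_length >= min_gap_size:
--                 gaps.append({
--                     "start": start,
--                     "end": end,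
--                     "length": gap_length,
--                     "mid": start + gap_length // 2
--                 })
--         else:
--             i += 1
--
--     return gaps
-- ===== SOURCE B (Python) =====
-- import re
--
-- def _find_gap_regions(sequence: str, min_gap_size: int = 50):
--     return [
--         {"start": m.start(), "end": m.end(),
--          "length": m.end() - m.start(),
--          "mid": m.start() + (m.end() - m.start()) // 2}
--         for m in re.finditer(r'[Nn]+', sequence)
--         if m.end() - m.start() >= min_gap_size
--     ]
-- ===== Notes on version B (the rewrite author's own statement) =====
-- stated objective: idiomatic
-- what changed: Replaced the manual index/nested-while maximal-run scan with a single regex pass (re.finditer over [Nn]+) and a list comprehension filtering runs by minimum length.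
import Mathlib
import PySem

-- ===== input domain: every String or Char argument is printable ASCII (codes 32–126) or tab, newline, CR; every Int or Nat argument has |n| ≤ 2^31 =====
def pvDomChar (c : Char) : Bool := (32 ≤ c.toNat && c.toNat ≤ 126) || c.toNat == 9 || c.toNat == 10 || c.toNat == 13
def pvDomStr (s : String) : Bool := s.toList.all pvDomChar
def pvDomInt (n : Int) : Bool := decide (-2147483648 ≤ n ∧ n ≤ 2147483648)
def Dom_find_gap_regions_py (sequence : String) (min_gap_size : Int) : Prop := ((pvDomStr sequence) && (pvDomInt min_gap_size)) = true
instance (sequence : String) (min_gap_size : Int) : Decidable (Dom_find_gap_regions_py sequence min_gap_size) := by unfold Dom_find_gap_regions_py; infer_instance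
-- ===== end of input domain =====

-- B replaces A's manual index/nested-while run scan with a regex-style single pass
-- (finditer over [Nn]+, modelled as a two-state scanner) filtered by minimum length;
-- objective: more idiomatic, same cost.

-- ===== PORT A =====
-- inner 'while i < len(sequence) and sequence[i].upper() == N': consumes the run,
-- returning its length and the remaining characters
def pvSpanN : List Char → Nat × List Char
  | [] => (0, [])
  | c :: rest =>
    if PySem.Chars.upperChar c = 'N' then
      let p := pvSpanN rest
      (p.1 + 1, p.2)
    else (0, c :: rest)

theorem pvSpanN_len_le (l : List Char) : (pvSpanN l).2.length ≤ l.length := by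
  induction l with
  | nil => simp [pvSpanN]
  | cons c rest ih =>
    simp only [pvSpanN]
    split
    · simpa using Nat.le_succ_of_le ih
    · simp

def pvFindA (l : List Char) (i m : Int) : List (List (String × Int)) :=
  match l with
  | [] => []
  | c :: rest =>
    if hc : PySem.Chars.upperChar c = 'N' then
      let p := pvSpanN (c :: rest)
      let start := i
      let e := i + (p.1 : Int)
      let len : Int := (p.1 : Int)
      if m ≤ len then
        [("start", start), ("end", e), ("length", len),
         ("mid", start + PySem.Int.floordiv len 2)] :: pvFindA p.2 e m
      else pvFindA p.2 e m
    else pvFindA rest (i + 1) m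
termination_by l.length
decreasing_by
  · simp only [pvSpanN, hc, if_true]
    have := pvSpanN_len_le rest
    simpa using Nat.lt_succ_of_le this
  · simp only [pvSpanN, hc, if_true]
    have := pvSpanN_len_le rest
    simpa using Nat.lt_succ_of_le this
  · simp

def find_gap_regions_py (sequence : String) (min_gap_size : Int) : List (List (String × Int)) :=
  pvFindA sequence.toList 0 min_gap_size

-- ===== PORT B =====
-- the regex engine for [Nn]+ as a two-state scanner: outside a match / inside a match
mutual
def pvScanOut : List Char → Int → List (Int × Int)
  | [], _ => []
  | c :: rest, i =>
    if c = 'N' ∨ c = 'n' then pvScanIn i rest (i + 1)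
    else pvScanOut rest (i + 1)
def pvScanIn (s : Int) : List Char → Int → List (Int × Int)
  | [], i => [(s, i)]
  | c :: rest, i =>
    if c = 'N' ∨ c = 'n' then pvScanIn s rest (i + 1)
    else (s, i) :: pvScanOut rest (i + 1)
end

def find_gap_regions_py_alt (sequence : String) (min_gap_size : Int) : List (List (String × Int)) :=
  (pvScanOut sequence.toList 0).filterMap (fun p =>
    if min_gap_size ≤ p.2 - p.1 then
      some [("start", p.1), ("end", p.2), ("length", p.2 - p.1),
            ("mid", p.1 + PySem.Int.floordiv (p.2 - p.1) 2)]
    else none)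

-- ===== PRECONDITION & SPEC =====
def Spec_find_gap_regions_py (sequence : String) (min_gap_size : Int) (out : List (List (String × Int))) : Prop := out = find_gap_regions_py_alt sequence min_gap_size
instance (sequence : String) (min_gap_size : Int) (out : List (List (String × Int))) : Decidable (Spec_find_gap_regions_py sequence min_gap_size out) := by unfold Spec_find_gap_regions_py; infer_instance

-- ===== CLAIM (what is proved, stated in full; the proofs are below) =====
def Claim_equal_find_gap_regions_py : Prop := ∀ (sequence : String) (min_gap_size : Int), Dom_find_gap_regions_py sequence min_gap_size → Spec_find_gap_regions_py sequence min_gap_size (find_gap_regions_py sequence min_gap_size)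

-- ===== LEMMAS AND PROOFS =====
theorem pv_char_toNat_inj {c c' : Char} (h : c.toNat = c'.toNat) : c = c' := by
  apply Char.ext; apply UInt32.toNat_inj.mp; exact h

-- sequence[i].upper() == 'N' tests exactly membership in the regex class [Nn]
theorem pv_upperChar_eq_N (c : Char) : (PySem.Chars.upperChar c = 'N') = (c = 'N' ∨ c = 'n') := by
  simp only [eq_iff_iff]
  unfold PySem.Chars.upperChar PySem.Chars.islower
  have hle : ∀ a b : Char, (a ≤ b) ↔ a.toNat ≤ b.toNat := fun a b => by
    rw [Char.le_def]; exact UInt32.le_iff_toNat_le ..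
  by_cases h : 'a' ≤ c ∧ c ≤ 'z'
  · have h1 := (hle 'a' c).mp h.1
    have h2 := (hle c 'z').mp h.2
    simp only [h.1, h.2, decide_true, Bool.and_self, if_true]
    have ha : ('a').toNat = 97 := rfl
    have hz : ('z').toNat = 122 := rfl
    rw [ha] at h1; rw [hz] at h2
    have hv : (c.toNat - 32).isValidChar := by
      constructor; omega
    have ht : (Char.ofNat (c.toNat - 32)).toNat = c.toNat - 32 := by
      simp [Char.ofNat, hv, Char.toNat_ofNatAux]
    constructor
    · intro hEq
      right
      apply pv_char_toNat_inj
      have := congrArg Char.toNat hEq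
      rw [ht] at this
      have hN : ('N').toNat = 78 := rfl
      rw [hN] at this
      show c.toNat = 110
      omega
    · rintro (rfl|rfl)
      · exfalso; revert h1; decide
      · apply pv_char_toNat_inj; rw [ht]; rfl
  · have hni : ¬ (decide ('a' ≤ c) && decide (c ≤ 'z')) = true := by
      simp only [Bool.and_eq_true, decide_eq_true_eq]; exact h
    simp only [hni]
    constructor
    · intro hc; left; exact hc
    · rintro (rfl|rfl)
      · rfl
      · exfalso; exact h (by decide)

-- inside a match, the scanner closes the run exactly where A's inner while stops
theorem pv_scanIn_spanN (l : List Char) (s i : Int) :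
    pvScanIn s l i = (s, i + ((pvSpanN l).1 : Int)) :: pvScanOut (pvSpanN l).2 (i + ((pvSpanN l).1 : Int)) := by
  induction l generalizing i with
  | nil => simp [pvScanIn, pvSpanN, pvScanOut]
  | cons c rest ih =>
    by_cases hc : c = 'N' ∨ c = 'n'
    · have hu : PySem.Chars.upperChar c = 'N' := by rw [pv_upperChar_eq_N]; exact hc
      simp only [pvScanIn, hc, if_true, pvSpanN, hu]
      rw [ih (i + 1)]
      have hcast : i + 1 + ((pvSpanN rest).1 : Int) = i + (((pvSpanN rest).1 + 1 : Nat) : Int) := by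
        push_cast; ring
      rw [hcast]
    · have hu : ¬ PySem.Chars.upperChar c = 'N' := by rw [pv_upperChar_eq_N]; exact hc
      simp only [pvScanIn, hc, if_false, pvSpanN, hu]
      simp [pvScanOut, hc]

theorem pv_scanOut_cons_N (c : Char) (rest : List Char) (i : Int)
    (hc : PySem.Chars.upperChar c = 'N') :
    pvScanOut (c :: rest) i =
      (i, i + ((pvSpanN (c :: rest)).1 : Int)) :: pvScanOut (pvSpanN (c :: rest)).2 (i + ((pvSpanN (c :: rest)).1 : Int)) := by
  have hcc : c = 'N' ∨ c = 'n' := by rw [← pv_upperChar_eq_N]; exact hc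
  simp only [pvScanOut, hcc, if_true]
  rw [pv_scanIn_spanN]
  simp only [pvSpanN, hc, if_true]
  have hcast : i + 1 + ((pvSpanN rest).1 : Int) = i + (((pvSpanN rest).1 + 1 : Nat) : Int) := by
    push_cast; ring
  rw [hcast]

theorem pv_findA_eq (n : Nat) : ∀ (l : List Char), l.length ≤ n → ∀ (i m : Int),
    pvFindA l i m = (pvScanOut l i).filterMap (fun p =>
      if m ≤ p.2 - p.1 then
        some [("start", p.1), ("end", p.2), ("length", p.2 - p.1),
              ("mid", p.1 + PySem.Int.floordiv (p.2 - p.1) 2)]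
      else none) := by
  induction n with
  | zero =>
    intro l hl i m
    have : l = [] := List.eq_nil_of_length_eq_zero (Nat.le_zero.mp hl)
    subst this
    simp [pvFindA, pvScanOut]
  | succ n ih =>
    intro l hl i m
    match l with
    | [] => simp [pvFindA, pvScanOut]
    | c :: rest =>
      by_cases hc : PySem.Chars.upperChar c = 'N'
      · rw [pvFindA, pv_scanOut_cons_N c rest i hc]
        simp only [hc, dif_pos]
        set K : Nat := (pvSpanN (c :: rest)).1 with hK
        set r : List Char := (pvSpanN (c :: rest)).2 with hr
        have hrn : r.length ≤ n := by
          have h1 : r.length ≤ rest.length := by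
            rw [hr]; simp only [pvSpanN, hc, if_true]; exact pvSpanN_len_le rest
          have h2 : rest.length ≤ n := by simpa using Nat.le_of_succ_le_succ hl
          omega
        have hsub : (i + (K : Int)) - i = (K : Int) := by ring
        rw [List.filterMap_cons]
        simp only [hsub]
        rw [ih r hrn (i + (K : Int)) m]
        by_cases hm : m ≤ (K : Int)
        · simp [hm]
        · simp [hm]
      · rw [pvFindA]
        simp only [hc, dif_neg, not_false_iff]
        have hcc : ¬ (c = 'N' ∨ c = 'n') := by rw [← pv_upperChar_eq_N]; exact hc
        have hrn : rest.length ≤ n := by simpa using Nat.le_of_succ_le_succ hl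
        rw [ih rest hrn (i + 1) m]
        simp only [pvScanOut, hcc, if_false]

-- ===== VERDICT (by name: the statement is the Claim_ definition above) =====
theorem find_gap_regions_py_spec : Claim_equal_find_gap_regions_py := by
  intro sequence min_gap_size _
  unfold Spec_find_gap_regions_py find_gap_regions_py find_gap_regions_py_alt
  exact pv_findA_eq sequence.toList.length sequence.toList (Nat.le_refl _) 0 min_gap_size
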